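-- pv_equiv track=rewrite | github.com/tudny/MIMUW-collection | WBO/WBO-collection/Lab12/lab.py | construct_occ_array
-- ===== SOURCE A (Python) =====
-- def construct_occ_array(bwt: str) -> dict[tuple[str, int], int]:
--     alphabet = sorted(set(bwt))
--     occ_dict = {(letter, -1): 0 for letter in alphabet}
--     for pos in range(len(bwt)):
--         for letter in alphabet:
--             is_this_letter = 1 if bwt[pos] == letter else 0
--             occ_dict[(letter, pos)] = occ_dict[(letter, pos - 1)] + is_this_letter
--     return {k: v for k, v in occ_dict.items() if k[1] >= 0}
-- ===== SOURCE B (Python) =====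
-- def construct_occ_array(bwt: str) -> dict[tuple[str, int], int]:
--     alphabet = sorted(set(bwt))
--     # letter-major pass: one running-count column per letter
--     cols = []
--     for letter in alphabet:
--         run = 0
--         col = []
--         for ch in bwt:
--             if ch == letter:
--                 run += 1
--             col.append(run)
--         cols.append(col)
--     # assemble position-major, no sentinel, no filtering
--     occ = {}
--     for pos in range(len(bwt)):
--         for col, letter in zip(cols, alphabet):
--             occ[(letter, pos)] = col[pos]
--     return occ
-- ===== Notes on version B (the rewrite author's own statement) =====
-- stated objective: alternative
-- what changed: Replaces the sentinel-keyed dict that each step reads back its own previous cell (and the final filtering comprehension) with letter-major prefix-count columns built by a plain running integer per letter, assembled position-major at the end.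
import Mathlib
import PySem

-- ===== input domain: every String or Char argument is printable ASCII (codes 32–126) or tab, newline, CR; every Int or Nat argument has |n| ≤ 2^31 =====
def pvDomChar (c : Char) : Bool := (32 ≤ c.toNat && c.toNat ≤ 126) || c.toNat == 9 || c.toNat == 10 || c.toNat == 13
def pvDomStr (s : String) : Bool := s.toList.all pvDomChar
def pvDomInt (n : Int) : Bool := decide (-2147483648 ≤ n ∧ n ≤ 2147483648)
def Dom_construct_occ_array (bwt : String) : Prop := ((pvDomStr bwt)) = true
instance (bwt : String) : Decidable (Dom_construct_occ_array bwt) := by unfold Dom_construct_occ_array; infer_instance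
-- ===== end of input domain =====

-- B replaces A's sentinel-keyed dict (each cell read back from the previous dict cell, then filtered)
-- with letter-major running-count columns assembled position-major: an alternative decomposition, same cost.

-- shared helper: Python's `sorted(set(bwt))` (a list of distinct characters, ascending)
def pvAlpha (l : List Char) : List Char := PySem.List.sorted (PySem.Set.ofList l) (fun c => c) false

-- ===== PORT A =====
def construct_occ_array (bwt : String) : List (String × Int × Int) :=
  let chars := bwt.toList
  let alphabet := pvAlpha chars
  let occ0 : PySem.Dict (Char × Int) Int :=
    alphabet.foldl (fun d letter => d.insert (letter, -1) 0) PySem.Dict.empty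
  let occ :=
    (PySem.List.pyRange 0 chars.length).foldl (fun d pos =>
      alphabet.foldl (fun d letter =>
        d.insert (letter, pos)
          (d.getD (letter, pos - 1) 0 +
            (if PySem.List.pyGet? chars pos = some letter then 1 else 0))) d) occ0
  (occ.items.filter fun kv => decide (0 ≤ kv.1.2)).map fun kv => (String.mk [kv.1.1], kv.1.2, kv.2)

-- ===== PORT B =====
def construct_occ_array_alt (bwt : String) : List (String × Int × Int) :=
  let chars := bwt.toList
  let alphabet := pvAlpha chars
  let cols : List (List Int) :=
    alphabet.foldl (fun cols letter =>
      cols ++ [(chars.foldl (fun (st : Int × List Int) ch =>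
          let run := if ch = letter then st.1 + 1 else st.1
          (run, st.2 ++ [run])) ((0 : Int), ([] : List Int))).2]) []
  let occ : PySem.Dict (Char × Int) Int :=
    (PySem.List.pyRange 0 chars.length).foldl (fun d pos =>
      (cols.zip alphabet).foldl (fun d cl =>
        -- col[pos]: always in range here, so getD with default is exact
        d.insert (cl.2, pos) (PySem.List.pyGetD cl.1 pos 0)) d) PySem.Dict.empty
  occ.items.map fun kv => (String.mk [kv.1.1], kv.1.2, kv.2)

-- ===== PRECONDITION & SPEC =====
def Spec_construct_occ_array (bwt : String) (out : List (String × Int × Int)) : Prop := out = construct_occ_array_alt bwt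
instance (bwt : String) (out : List (String × Int × Int)) : Decidable (Spec_construct_occ_array bwt out) := by unfold Spec_construct_occ_array; infer_instance

-- ===== CLAIM (what is proved, stated in full; the proofs are below) =====
def Claim_equal_construct_occ_array : Prop := ∀ (bwt : String), Dom_construct_occ_array bwt → Spec_construct_occ_array bwt (construct_occ_array bwt)

-- ===== LEMMAS AND PROOFS =====

-- count of c among the first p characters of l
def pvCnt (l : List Char) (c : Char) (p : Nat) : Int := ((l.take p).count c : Int)

-- the common value both dictionaries hold after processing positions 0..m-1
def pvFlat (l : List Char) (m : Nat) : List ((Char × Int) × Int) :=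
  (List.range m).flatMap fun (p : Nat) => (pvAlpha l).map fun c => ((c, (p : Int)), pvCnt l c (p + 1))

def pvTgt (l : List Char) : List (String × Int × Int) :=
  (pvFlat l l.length).map fun kv => (String.mk [kv.1.1], kv.1.2, kv.2)

-- A's initial sentinel dict and per-position steps, named for the proofs
def pvOcc0 (l : List Char) : PySem.Dict (Char × Int) Int :=
  (pvAlpha l).foldl (fun d letter => d.insert (letter, -1) 0) PySem.Dict.empty

def pvStepA (l : List Char) (d : PySem.Dict (Char × Int) Int) (pos : Int) : PySem.Dict (Char × Int) Int :=
  (pvAlpha l).foldl (fun d letter =>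
    d.insert (letter, pos)
      (d.getD (letter, pos - 1) 0 +
        (if PySem.List.pyGet? l pos = some letter then 1 else 0))) d

def pvCols (l : List Char) : List (List Int) :=
  (pvAlpha l).foldl (fun cols letter =>
    cols ++ [(l.foldl (fun (st : Int × List Int) ch =>
        let run := if ch = letter then st.1 + 1 else st.1
        (run, st.2 ++ [run])) ((0 : Int), ([] : List Int))).2]) []

def pvStepB (l : List Char) (d : PySem.Dict (Char × Int) Int) (pos : Int) : PySem.Dict (Char × Int) Int :=
  ((pvCols l).zip (pvAlpha l)).foldl (fun d cl =>
    d.insert (cl.2, pos) (PySem.List.pyGetD cl.1 pos 0)) d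

lemma pvA_eq (bwt : String) : construct_occ_array bwt =
    (((PySem.List.pyRange 0 bwt.toList.length).foldl (pvStepA bwt.toList) (pvOcc0 bwt.toList)).items.filter
        fun kv => decide (0 ≤ kv.1.2)).map (fun kv => (String.mk [kv.1.1], kv.1.2, kv.2)) := rfl

lemma pvB_eq (bwt : String) : construct_occ_array_alt bwt =
    (((PySem.List.pyRange 0 bwt.toList.length).foldl (pvStepB bwt.toList) PySem.Dict.empty).items).map
      (fun kv => (String.mk [kv.1.1], kv.1.2, kv.2)) := rfl

lemma pvAlpha_nodup (l : List Char) : (pvAlpha l).Nodup :=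
  ((PySem.List.sorted_perm _ _ _).nodup_iff).mpr (PySem.Set.nodup_ofList l)

lemma pvCnt_zero (l : List Char) (c : Char) : pvCnt l c 0 = 0 := by simp [pvCnt]

lemma pvCnt_succ (l : List Char) (c : Char) (m : Nat) (hm : m < l.length) :
    pvCnt l c (m + 1) = pvCnt l c m + (if PySem.List.pyGet? l (m : Int) = some c then 1 else 0) := by
  have hget : PySem.List.pyGet? l ((m : Nat) : Int) = l[m]? := by
    simp [pysem]
  rw [hget, List.getElem?_eq_getElem hm]
  unfold pvCnt
  rw [List.take_succ, List.count_append, List.getElem?_eq_getElem hm]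
  by_cases hc : l[m] = c
  · simp [hc]
  · simp [hc]

-- fold of fresh-key inserts: items append, contains, and getD, all at once
lemma pvFoldInsert {κ β : Type} [DecidableEq κ] [BEq κ] [LawfulBEq κ]
    (L : List β) (k : β → κ) (v : PySem.Dict κ Int → β → Int) (d : PySem.Dict κ Int)
    (hv : ∀ (dd : PySem.Dict κ Int) (b b' : β) (w : Int), b ∈ L → b' ∈ L →
        v (dd.insert (k b') w) b = v dd b)
    (hfresh : ∀ b ∈ L, d.contains (k b) = false)
    (hnd : (L.map k).Nodup) :
    ((L.foldl (fun d b => d.insert (k b) (v d b)) d).items = d.items ++ L.map (fun b => (k b, v d b)))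
    ∧ (∀ key : κ, (L.foldl (fun d b => d.insert (k b) (v d b)) d).contains key = true
        ↔ key ∈ L.map k ∨ d.contains key = true)
    ∧ (∀ (key : κ) (d0 : Int), key ∉ L.map k →
        (L.foldl (fun d b => d.insert (k b) (v d b)) d).getD key d0 = d.getD key d0)
    ∧ (∀ b ∈ L, (L.foldl (fun d b => d.insert (k b) (v d b)) d).getD (k b) 0 = v d b) := by
  induction L generalizing d with
  | nil => simp
  | cons b rest ih =>
    have hfb : d.contains (k b) = false := hfresh b (List.mem_cons_self ..)
    have hnd0 : (k b :: rest.map k).Nodup := by simpa using hnd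
    have hkb : k b ∉ rest.map k := (List.nodup_cons.mp hnd0).1
    have hnd' : (rest.map k).Nodup := (List.nodup_cons.mp hnd0).2
    have hv' : ∀ (dd : PySem.Dict κ Int) (b1 b1' : β) (w : Int), b1 ∈ rest → b1' ∈ rest →
        v (dd.insert (k b1') w) b1 = v dd b1 :=
      fun dd b1 b1' w h1 h2 => hv dd b1 b1' w (List.mem_cons_of_mem _ h1) (List.mem_cons_of_mem _ h2)
    have hfresh' : ∀ b1 ∈ rest, (d.insert (k b) (v d b)).contains (k b1) = false := by
      intro b1 h1
      rw [PySem.Dict.contains_insert]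
      have hne : (k b1 == k b) = false := by
        apply beq_false_of_ne
        intro he
        exact hkb (he ▸ List.mem_map_of_mem h1)
      simp [hne, hfresh b1 (List.mem_cons_of_mem _ h1)]
    obtain ⟨i1, i2, i3, i4⟩ := ih (d.insert (k b) (v d b)) hv' hfresh' hnd'
    have hvdd : ∀ b1 ∈ rest, v (d.insert (k b) (v d b)) b1 = v d b1 :=
      fun b1 h1 => hv d b1 b _ (List.mem_cons_of_mem _ h1) (List.mem_cons_self ..)
    refine ⟨?_, ?_, ?_, ?_⟩
    · simp only [List.foldl_cons]
      rw [i1, PySem.Dict.items_insert_of_not_contains d _ hfb,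
        List.map_congr_left (fun b1 h1 => by rw [hvdd b1 h1] :
          ∀ b1 ∈ rest, (k b1, v (d.insert (k b) (v d b)) b1) = (k b1, v d b1))]
      simp
    · intro key
      simp only [List.foldl_cons]
      rw [i2 key, PySem.Dict.contains_insert]
      simp only [List.map_cons, List.mem_cons, Bool.or_eq_true, beq_iff_eq]
      tauto
    · intro key d0 hkey
      simp only [List.foldl_cons]
      have h1 : key ∉ rest.map k := fun h => hkey (by simp [h])
      have h2 : ¬ key = k b := fun h => hkey (by simp [h])
      rw [i3 key d0 h1, PySem.Dict.getD_insert]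
      simp [h2]
    · intro b0 h0
      rcases List.mem_cons.mp h0 with h0 | h0
      · subst h0
        simp only [List.foldl_cons]
        rw [i3 (k b0) 0 hkb, PySem.Dict.getD_insert]
        simp
      · simp only [List.foldl_cons]
        rw [i4 b0 h0, hvdd b0 h0]

lemma pvKeyNodup (l : List Char) (j : Int) : ((pvAlpha l).map fun c => (c, j)).Nodup :=
  List.Nodup.map (fun a b h => by simpa using congrArg Prod.fst h) (pvAlpha_nodup l)

lemma pvOcc0_spec (l : List Char) :
    (pvOcc0 l).items = (pvAlpha l).map (fun c => ((c, (-1 : Int)), (0 : Int)))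
    ∧ (∀ key : Char × Int, (pvOcc0 l).contains key = true ↔ key.1 ∈ pvAlpha l ∧ key.2 = -1)
    ∧ (∀ c ∈ pvAlpha l, (pvOcc0 l).getD (c, -1) 0 = 0) := by
  obtain ⟨i1, i2, i3, i4⟩ := pvFoldInsert (pvAlpha l) (fun c => (c, (-1 : Int))) (fun _ _ => 0)
    PySem.Dict.empty (by intros; rfl) (by intro b _; exact PySem.Dict.contains_empty _)
    (pvKeyNodup l (-1))
  have hempty : (PySem.Dict.empty : PySem.Dict (Char × Int) Int).items = [] := rfl
  refine ⟨?_, ?_, ?_⟩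
  · unfold pvOcc0
    simpa [hempty] using i1
  · intro key
    unfold pvOcc0
    rw [i2 key]
    obtain ⟨c0, j⟩ := key
    simp [PySem.Dict.contains_empty, List.mem_map, Prod.ext_iff, eq_comm]
  · intro c hc
    exact i4 c hc

lemma pvFlat_zero (l : List Char) : pvFlat l 0 = [] := by simp [pvFlat]

lemma pvFlat_succ (l : List Char) (m : Nat) :
    pvFlat l (m + 1) = pvFlat l m ++ ((pvAlpha l).map fun c => ((c, (m : Int)), pvCnt l c (m + 1))) := by
  simp [pvFlat, List.range_succ]

-- A-side loop invariant
lemma pvAInv (l : List Char) (m : Nat) (hm : m ≤ l.length) :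
    (((List.range m).map (fun (p : Nat) => (p : Int))).foldl (pvStepA l) (pvOcc0 l)).items
        = ((pvAlpha l).map fun c => ((c, (-1 : Int)), (0 : Int))) ++ pvFlat l m
    ∧ (∀ key : Char × Int,
        (((List.range m).map (fun (p : Nat) => (p : Int))).foldl (pvStepA l) (pvOcc0 l)).contains key = true
          ↔ key.1 ∈ pvAlpha l ∧ -1 ≤ key.2 ∧ key.2 < (m : Int))
    ∧ (∀ c ∈ pvAlpha l, ∀ j : Nat, j ≤ m →
        (((List.range m).map (fun (p : Nat) => (p : Int))).foldl (pvStepA l) (pvOcc0 l)).getD (c, (j : Int) - 1) 0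
          = pvCnt l c j) := by
  induction m with
  | zero =>
    obtain ⟨o1, o2, o3⟩ := pvOcc0_spec l
    refine ⟨by simpa [pvFlat_zero] using o1, ?_, ?_⟩
    · intro key
      simp only [List.range_zero, List.map_nil, List.foldl_nil]
      rw [o2 key]
      constructor
      · rintro ⟨h1, h2⟩
        exact ⟨h1, by omega, by omega⟩
      · rintro ⟨h1, h2, h3⟩
        exact ⟨h1, by omega⟩
    · intro c hc j hj
      interval_cases j
      simpa [pvCnt_zero] using o3 c hc
  | succ m ih =>
    obtain ⟨a1, a2, a3⟩ := ih (by omega)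
    set D := (((List.range m).map (fun (p : Nat) => (p : Int))).foldl (pvStepA l) (pvOcc0 l)) with hD
    have hmlt : m < l.length := by omega
    have hv : ∀ (dd : PySem.Dict (Char × Int) Int) (b b' : Char) (w : Int),
        b ∈ pvAlpha l → b' ∈ pvAlpha l →
        (fun (d : PySem.Dict (Char × Int) Int) c => d.getD (c, (m : Int) - 1) 0 +
          (if PySem.List.pyGet? l (m : Int) = some c then 1 else 0)) (dd.insert ((fun c => (c, (m : Int))) b') w) b
        = (fun (d : PySem.Dict (Char × Int) Int) c => d.getD (c, (m : Int) - 1) 0 +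
          (if PySem.List.pyGet? l (m : Int) = some c then 1 else 0)) dd b := by
      intro dd b b' w _ _
      simp only
      rw [PySem.Dict.getD_insert]
      have hne : ¬ ((b, (m : Int) - 1) = (b', (m : Int))) := by
        intro h
        have h2 : (m : Int) - 1 = (m : Int) := congrArg Prod.snd h
        omega
      simp [hne]
    have hfresh : ∀ b ∈ pvAlpha l, D.contains ((fun c => (c, (m : Int))) b) = false := by
      intro b _
      show D.contains (b, (m : Int)) = false
      cases h : D.contains (b, (m : Int)) with
      | false => rfl
      | true => exact absurd ((a2 (b, (m : Int))).mp h).2.2 (by omega)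
    obtain ⟨i1, i2, i3, i4⟩ := pvFoldInsert (pvAlpha l) (fun c => (c, (m : Int)))
      (fun d c => d.getD (c, (m : Int) - 1) 0 + (if PySem.List.pyGet? l (m : Int) = some c then 1 else 0))
      D hv hfresh (pvKeyNodup l m)
    have hfold : (((List.range (m + 1)).map (fun (p : Nat) => (p : Int))).foldl (pvStepA l) (pvOcc0 l))
        = (pvAlpha l).foldl (fun d c => d.insert ((fun c => (c, (m : Int))) c)
            ((fun (d : PySem.Dict (Char × Int) Int) c => d.getD (c, (m : Int) - 1) 0 +
              (if PySem.List.pyGet? l (m : Int) = some c then 1 else 0)) d c)) D := by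
      rw [List.range_succ, List.map_append, List.foldl_append]
      rfl
    have hval : ∀ c ∈ pvAlpha l,
        D.getD (c, (m : Int) - 1) 0 + (if PySem.List.pyGet? l (m : Int) = some c then 1 else 0)
          = pvCnt l c (m + 1) := by
      intro c hc
      have h3 := a3 c hc m le_rfl
      rw [h3, ← pvCnt_succ l c m hmlt]
    refine ⟨?_, ?_, ?_⟩
    · rw [hfold, i1, a1, pvFlat_succ, List.append_assoc]
      congr 1
      congr 1
      exact List.map_congr_left fun c hc => by rw [hval c hc]
    · intro key
      rw [hfold, i2 key, a2 key]
      constructor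
      · rintro (h | ⟨h1, h2, h3⟩)
        · obtain ⟨c1, hc1, hec⟩ := List.mem_map.mp h
          cases hec
          exact ⟨hc1, by show (-1 : Int) ≤ (m : Int); omega,
            by show ((m : Nat) : Int) < (((m + 1 : Nat) : Nat) : Int); push_cast; omega⟩
        · refine ⟨h1, h2, ?_⟩
          push_cast
          omega
      · rintro ⟨h1, h2, h3⟩
        by_cases hj : key.2 = (m : Int)
        · exact Or.inl (List.mem_map.mpr ⟨key.1, h1, by rw [← hj]⟩)
        · right
          refine ⟨h1, h2, ?_⟩
          push_cast at h3
          omega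
    · intro c hc j hj
      rw [hfold]
      by_cases hjm : j = m + 1
      · subst hjm
        rw [show (((m + 1 : Nat) : Int) - 1) = (m : Int) by push_cast; ring]
        rw [i4 c hc]
        exact hval c hc
      · have hjle : j ≤ m := by omega
        have hnot : ((c, (j : Int) - 1)) ∉ (pvAlpha l).map (fun c => (c, (m : Int))) := by
          simp only [List.mem_map, Prod.ext_iff]
          rintro ⟨c1, _, _, h2⟩
          omega
        rw [i3 _ 0 hnot]
        exact a3 c hc j hjle

-- B-side: the columns are per-letter prefix counts
lemma pvColSpec (c : Char) (l : List Char) (a : Int) (acc : List Int) :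
    (l.foldl (fun (st : Int × List Int) ch =>
        let run := if ch = c then st.1 + 1 else st.1
        (run, st.2 ++ [run])) (a, acc)).2
    = acc ++ (List.range l.length).map fun j => a + (((l.take (j + 1)).count c : Nat) : Int) := by
  induction l generalizing a acc with
  | nil => simp
  | cons ch tl ih =>
    simp only [List.foldl_cons]
    rw [ih]
    rw [List.length_cons, List.range_succ_eq_map]
    simp only [List.map_cons, List.map_map, Function.comp_def, Nat.succ_eq_add_one,
      List.take_succ_cons, List.take_zero]
    rw [List.append_assoc]
    congr 1
    rw [List.singleton_append]
    congr 1
    · by_cases hc : ch = c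
      · simp [hc]
      · simp [hc]
    · apply List.map_congr_left
      intro j _
      by_cases hc : ch = c
      · simp only [hc, List.count_cons_self]
        push_cast
        ring
      · simp [hc]

def pvColF (l : List Char) (c : Char) : List Int := (List.range l.length).map fun j => pvCnt l c (j + 1)

lemma pvCols_eq (l : List Char) : pvCols l = (pvAlpha l).map (pvColF l) := by
  unfold pvCols
  rw [PySem.List.foldl_append_singleton_eq_map
    (fun letter => (l.foldl (fun (st : Int × List Int) ch =>
        let run := if ch = letter then st.1 + 1 else st.1
        (run, st.2 ++ [run])) ((0 : Int), ([] : List Int))).2) (pvAlpha l) []]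
  simp only [List.nil_append]
  apply List.map_congr_left
  intro c _
  rw [pvColSpec c l 0 []]
  simp [pvColF, pvCnt]

lemma pvZipSelf (l : List Char) : (pvCols l).zip (pvAlpha l) = (pvAlpha l).map fun c => (pvColF l c, c) := by
  rw [pvCols_eq]
  have h := List.zip_map' (f := pvColF l) (g := id) (l := pvAlpha l)
  rw [List.map_id] at h
  exact h

lemma pvColF_get (l : List Char) (c : Char) (m : Nat) (hm : m < l.length) :
    PySem.List.pyGetD (pvColF l c) (m : Int) 0 = pvCnt l c (m + 1) := by
  rw [PySem.List.pyGetD_natCast]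
  simp [pvColF, List.getD, hm]

-- B-side loop invariant
lemma pvBInv (l : List Char) (m : Nat) (hm : m ≤ l.length) :
    (((List.range m).map (fun (p : Nat) => (p : Int))).foldl (pvStepB l) PySem.Dict.empty).items = pvFlat l m
    ∧ (∀ key : Char × Int,
        (((List.range m).map (fun (p : Nat) => (p : Int))).foldl (pvStepB l) PySem.Dict.empty).contains key = true
          ↔ key.1 ∈ pvAlpha l ∧ 0 ≤ key.2 ∧ key.2 < (m : Int)) := by
  induction m with
  | zero =>
    refine ⟨?_, ?_⟩
    · rw [pvFlat_zero]
      rfl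
    · intro key
      simp only [List.range_zero, List.map_nil, List.foldl_nil]
      rw [PySem.Dict.contains_empty]
      constructor
      · intro h
        cases h
      · rintro ⟨_, h2, h3⟩
        omega
  | succ m ih =>
    obtain ⟨b1, b2⟩ := ih (by omega)
    set D := (((List.range m).map (fun (p : Nat) => (p : Int))).foldl (pvStepB l) PySem.Dict.empty) with hD
    have hmlt : m < l.length := by omega
    have hfresh : ∀ b ∈ pvAlpha l, D.contains ((fun c => (c, (m : Int))) b) = false := by
      intro b _
      show D.contains (b, (m : Int)) = false
      cases h : D.contains (b, (m : Int)) with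
      | false => rfl
      | true => exact absurd ((b2 (b, (m : Int))).mp h).2.2 (by omega)
    obtain ⟨i1, i2, i3, i4⟩ := pvFoldInsert (pvAlpha l) (fun c => (c, (m : Int)))
      (fun _ c => PySem.List.pyGetD (pvColF l c) (m : Int) 0) D
      (by intros; rfl) hfresh (pvKeyNodup l m)
    have hfold : (((List.range (m + 1)).map (fun (p : Nat) => (p : Int))).foldl (pvStepB l) PySem.Dict.empty)
        = (pvAlpha l).foldl (fun d c => d.insert ((fun c => (c, (m : Int))) c)
            ((fun (_ : PySem.Dict (Char × Int) Int) c => PySem.List.pyGetD (pvColF l c) (m : Int) 0) d c)) D := by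
      rw [List.range_succ, List.map_append, List.foldl_append]
      show pvStepB l D (m : Int) = _
      unfold pvStepB
      rw [pvZipSelf, List.foldl_map]
    refine ⟨?_, ?_⟩
    · rw [hfold, i1, b1, pvFlat_succ]
      congr 1
      exact List.map_congr_left fun c hc => by rw [pvColF_get l c m hmlt]
    · intro key
      rw [hfold, i2 key, b2 key]
      constructor
      · rintro (h | ⟨h1, h2, h3⟩)
        · obtain ⟨c1, hc1, hec⟩ := List.mem_map.mp h
          cases hec
          exact ⟨hc1, by show (0 : Int) ≤ (m : Int); omega,
            by show ((m : Nat) : Int) < (((m + 1 : Nat) : Nat) : Int); push_cast; omega⟩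
        · refine ⟨h1, h2, ?_⟩
          push_cast
          omega
      · rintro ⟨h1, h2, h3⟩
        by_cases hj : key.2 = (m : Int)
        · exact Or.inl (List.mem_map.mpr ⟨key.1, h1, by rw [← hj]⟩)
        · right
          refine ⟨h1, h2, ?_⟩
          push_cast at h3
          omega

lemma pvA_tgt (bwt : String) : construct_occ_array bwt = pvTgt bwt.toList := by
  rw [pvA_eq, PySem.List.pyRange_zero_natCast]
  obtain ⟨a1, -, -⟩ := pvAInv bwt.toList bwt.toList.length le_rfl
  rw [a1, List.filter_append]
  have hsent : (((pvAlpha bwt.toList).map fun c => ((c, (-1 : Int)), (0 : Int))).filter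
      fun kv => decide (0 ≤ kv.1.2)) = [] := by
    rw [List.filter_eq_nil_iff]
    intro kv hkv
    obtain ⟨c, -, rfl⟩ := List.mem_map.mp hkv
    simp
  have hkeep : ((pvFlat bwt.toList bwt.toList.length).filter fun kv => decide (0 ≤ kv.1.2))
      = pvFlat bwt.toList bwt.toList.length := by
    apply List.filter_eq_self.mpr
    intro kv hkv
    simp only [pvFlat, List.mem_flatMap, List.mem_map] at hkv
    obtain ⟨p, -, c, -, rfl⟩ := hkv
    simp
  rw [hsent, hkeep, List.nil_append]
  rfl

lemma pvB_tgt (bwt : String) : construct_occ_array_alt bwt = pvTgt bwt.toList := by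
  rw [pvB_eq, PySem.List.pyRange_zero_natCast]
  obtain ⟨b1, -⟩ := pvBInv bwt.toList bwt.toList.length le_rfl
  rw [b1]
  rfl

-- ===== VERDICT (by name: the statement is the Claim_ definition above) =====
theorem construct_occ_array_spec : Claim_equal_construct_occ_array := by
  intro bwt _
  unfold Spec_construct_occ_array
  rw [pvA_tgt, pvB_tgt]
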